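-- pv_equiv track=rewrite | github.com/SaintChimera/WordleHelper | bin/player.py | suggest_letters
-- ===== SOURCE A (Python) =====
-- def suggest_letters(words, omit=None, include={}):
--     # make a dict with the number of occurences for ever letter.
--     letter_dist = {}
--     for word in words:
--         for letter in word:
--             if letter in letter_dist:
--                 letter_dist[letter] += 1
--             else:
--                 letter_dist[letter] = 1
--
--     # return the top 5
--     letters = list(include.keys())
--     for i in range(len(letters),5):
--         largest_key = ''
--         largest_value = 0
--         for key,value in letter_dist.items():
--             if key in omit:
--                 continue
--             if value > largest_value:
--                 largest_key = key
--                 largest_value = value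
--         letters.append(largest_key)
--         letter_dist.pop(largest_key)
--     letters = ''.join(a for a in letters)
--     return letters
-- ===== SOURCE B (Python) =====
-- def suggest_letters(words, omit=None, include={}):
--     letter_dist = {}
--     for word in words:
--         for letter in word:
--             letter_dist[letter] = letter_dist.get(letter, 0) + 1
--     need = 5 - len(include)
--     picked = []
--     if need > 0:
--         eligible = [k for k in letter_dist if k not in omit]
--         eligible.sort(key=lambda k: -letter_dist[k])  # stable: ties keep first-seen order
--         picked = eligible[:need]
--     return ''.join(list(include.keys()) + picked)
-- ===== Notes on version B (the rewrite author's own statement) =====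
-- stated objective: simpler
-- what changed: A's five-round selection loop (re-scan all counts for the first strict maximum, then pop it from the dict) is replaced by one stable sort of the eligible letters by descending count and taking the first 5 - len(include) of them.
-- crash fix: On inputs with fewer distinct non-omitted letters than open slots (5 - len(include)), A raises KeyError('') from letter_dist.pop(''), while B returns the string of the include keys plus all available letters. — e.g. on suggest_letters(["ab", "b"], [], []): A raises KeyError, B returns "ba"
import Mathlib
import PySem

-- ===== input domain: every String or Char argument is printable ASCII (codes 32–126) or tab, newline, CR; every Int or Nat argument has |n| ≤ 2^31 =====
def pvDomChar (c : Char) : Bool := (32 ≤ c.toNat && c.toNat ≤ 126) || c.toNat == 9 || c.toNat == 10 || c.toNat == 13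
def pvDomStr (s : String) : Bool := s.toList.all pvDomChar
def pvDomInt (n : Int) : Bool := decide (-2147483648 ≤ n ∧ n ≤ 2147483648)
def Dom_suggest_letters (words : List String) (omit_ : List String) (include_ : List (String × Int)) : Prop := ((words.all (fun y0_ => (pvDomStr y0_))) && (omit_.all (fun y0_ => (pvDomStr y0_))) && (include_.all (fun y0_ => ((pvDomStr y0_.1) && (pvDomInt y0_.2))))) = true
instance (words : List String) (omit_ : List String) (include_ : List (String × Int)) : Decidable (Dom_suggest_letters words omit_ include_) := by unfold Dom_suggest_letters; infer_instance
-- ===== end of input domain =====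

-- B replaces A's quadratic five-round "scan all counts for the strict maximum, then pop it"
-- selection loop by a single stable sort of the eligible letters by descending count and a
-- prefix take (objective: simpler / more idiomatic; same observable return value).

-- ===== PORT A =====
-- Python's `letter` ranges over 1-character strings
def pvToStr (c : Char) : String := String.mk [c]

-- the letter_dist-building loop of A
def pvDistA (words : List String) : PySem.Dict String Int :=
  words.foldl (fun d word =>
    (word.toList.map pvToStr).foldl (fun d letter =>
      if d.contains letter then d.modify letter 0 (· + 1)
      else d.insert letter 1) d) PySem.Dict.empty

-- A's inner loop: first key/value with strictly largest value, skipping omitted keys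
def pvLargest (omit_ : List String) (d : PySem.Dict String Int) : String × Int :=
  d.items.foldl (fun p kv =>
    if omit_.contains kv.1 then p
    else if kv.2 > p.2 then (kv.1, kv.2) else p) ("", 0)

-- one iteration of A's `for i in range(len(letters), 5)` loop; `pop` = erase
-- (dict.pop raises KeyError when the key is absent — exactly the inputs Pre_ excludes)
def pvStepA (omit_ : List String) (st : List String × PySem.Dict String Int) :
    List String × PySem.Dict String Int :=
  (st.1 ++ [(pvLargest omit_ st.2).1], st.2.erase (pvLargest omit_ st.2).1)

def suggest_letters (words : List String) (omit_ : List String) (include_ : List (String × Int)) : String :=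
  PySem.Str.join ""
    (((PySem.List.pyRange (((PySem.Dict.ofList include_).keys.length : Int)) 5 1).foldl
        (fun st _ => pvStepA omit_ st)
        ((PySem.Dict.ofList include_).keys, pvDistA words)).1)

-- ===== PORT B =====
-- Source B's counting loop: letter_dist[letter] = letter_dist.get(letter, 0) + 1
def pvDistB (words : List String) : PySem.Dict String Int :=
  words.foldl (fun d word =>
    word.toList.foldl (fun d c =>
      d.insert (pvToStr c) (d.getD (pvToStr c) 0 + 1)) d) PySem.Dict.empty

def suggest_letters_alt (words : List String) (omit_ : List String) (include_ : List (String × Int)) : String :=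
  PySem.Str.join ""
    ((PySem.Dict.ofList include_).keys ++
      (if 0 < (5 - (((PySem.Dict.ofList include_).keys.length : Int))) then
        (PySem.List.sorted
            ((pvDistB words).keys.filter (fun k => !(omit_.contains k)))
            (fun k => -((pvDistB words).getD k 0)) false).take
          (5 - (((PySem.Dict.ofList include_).keys.length : Int))).toNat
      else []))

-- ===== PRECONDITION & SPEC =====
-- the distinct letters occurring in `words`, in first-occurrence order
def pvLettersOf (words : List String) : List String :=
  PySem.Set.ofList (words.flatMap (fun w => w.toList.map pvToStr))

-- the distinct letters that may be suggested (not omitted)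
def pvEligibleOf (words : List String) (omit_ : List String) : List String :=
  (pvLettersOf words).filter (fun k => !(omit_.contains k))

-- Pre_ excludes exactly the inputs on which A raises KeyError(''): those where fewer
-- distinct non-omitted letters occur in `words` than the 5 - len(include) slots to fill.
def Pre_suggest_letters (words : List String) (omit_ : List String) (include_ : List (String × Int)) : Prop :=
  (5 : Int) - ((PySem.List.dedup (include_.map Prod.fst)).length : Int) ≤ ((pvEligibleOf words omit_).length : Int)
instance (words : List String) (omit_ : List String) (include_ : List (String × Int)) : Decidable (Pre_suggest_letters words omit_ include_) := by unfold Pre_suggest_letters; infer_instance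

def pvWitness_suggest_letters : List String × List String × (List (String × Int)) :=
  (["abcde"], ["x"], [("z", 1)])

-- On inputs with fewer distinct non-omitted letters than open slots, A raises KeyError('') while B returns the (shorter) string of what is available.
def Raises_suggest_letters (words : List String) (omit_ : List String) (include_ : List (String × Int)) : Prop :=
  ((pvEligibleOf words omit_).length : Int) < (5 : Int) - ((PySem.List.dedup (include_.map Prod.fst)).length : Int)
instance (words : List String) (omit_ : List String) (include_ : List (String × Int)) : Decidable (Raises_suggest_letters words omit_ include_) := by unfold Raises_suggest_letters; infer_instance

def pvRaiseWitness_suggest_letters : List String × List String × (List (String × Int)) :=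
  (["ab", "b"], [], [])

def pvRaiseWitnessOut_suggest_letters : String := "ba"

def Spec_suggest_letters (words : List String) (omit_ : List String) (include_ : List (String × Int)) (out : String) : Prop := out = suggest_letters_alt words omit_ include_
instance (words : List String) (omit_ : List String) (include_ : List (String × Int)) (out : String) : Decidable (Spec_suggest_letters words omit_ include_ out) := by unfold Spec_suggest_letters; infer_instance

-- ===== CLAIM (what is proved, stated in full; the proofs are below) =====
def Claim_equal_suggest_letters : Prop := ∀ (words : List String) (omit_ : List String) (include_ : List (String × Int)), Dom_suggest_letters words omit_ include_ → Pre_suggest_letters words omit_ include_ → Spec_suggest_letters words omit_ include_ (suggest_letters words omit_ include_)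

def Claim_raises_suggest_letters : Prop := (∀ (words : List String) (omit_ : List String) (include_ : List (String × Int)), Dom_suggest_letters words omit_ include_ → Raises_suggest_letters words omit_ include_ → ¬ Pre_suggest_letters words omit_ include_) ∧ (Dom_suggest_letters (pvRaiseWitness_suggest_letters.1) (pvRaiseWitness_suggest_letters.2.1) (pvRaiseWitness_suggest_letters.2.2) ∧ Raises_suggest_letters (pvRaiseWitness_suggest_letters.1) (pvRaiseWitness_suggest_letters.2.1) (pvRaiseWitness_suggest_letters.2.2) ∧ suggest_letters_alt (pvRaiseWitness_suggest_letters.1) (pvRaiseWitness_suggest_letters.2.1) (pvRaiseWitness_suggest_letters.2.2) = pvRaiseWitnessOut_suggest_letters)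

-- ===== LEMMAS AND PROOFS =====

-- A's "if present, bump; else insert 1" is dict-for-dict B's insert of get(,0)+1
theorem pvStep_count_eq (d : PySem.Dict String Int) (x : String) :
    (if d.contains x then d.modify x 0 (· + 1) else d.insert x 1) = d.insert x (d.getD x 0 + 1) := by
  by_cases h : d.contains x
  · simp [h, PySem.Dict.modify]
  · have hf : d.items.find? (fun p => p.1 == x) = none := by
      rw [List.find?_eq_none]
      intro p hp hpx
      exact h (show d.contains x = true from List.any_eq_true.mpr ⟨p, hp, hpx⟩)
    simp [h, PySem.Dict.getD, PySem.Dict.get?, hf]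

theorem pvDistA_eq_pvDistB (words : List String) : pvDistA words = pvDistB words := by
  unfold pvDistA pvDistB
  have hFG : (fun (d : PySem.Dict String Int) (word : String) =>
        (word.toList.map pvToStr).foldl (fun d letter =>
          if d.contains letter then d.modify letter 0 (· + 1)
          else d.insert letter 1) d)
      = (fun (d : PySem.Dict String Int) (word : String) =>
        word.toList.foldl (fun d c => d.insert (pvToStr c) (d.getD (pvToStr c) 0 + 1)) d) := by
    funext d word
    rw [List.foldl_map]
    have hstep : (fun (d : PySem.Dict String Int) (c : Char) =>
          if d.contains (pvToStr c) then d.modify (pvToStr c) 0 (· + 1)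
          else d.insert (pvToStr c) 1)
        = (fun (d : PySem.Dict String Int) (c : Char) =>
          d.insert (pvToStr c) (d.getD (pvToStr c) 0 + 1)) := by
      funext d c
      exact pvStep_count_eq d (pvToStr c)
    rw [hstep]
  rw [hFG]

theorem pvDistB_eq_counter (words : List String) :
    pvDistB words = PySem.Dict.counter (words.flatMap (fun w => w.toList.map pvToStr)) := by
  unfold pvDistB
  rw [← PySem.Dict.foldl_insert_getD_add_one_eq_counter, List.foldl_flatMap]
  have h : (fun (acc : PySem.Dict String Int) (w : String) =>
        (w.toList.map pvToStr).foldl (fun d x => d.insert x (d.getD x 0 + 1)) acc)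
      = (fun (acc : PySem.Dict String Int) (w : String) =>
        w.toList.foldl (fun d c => d.insert (pvToStr c) (d.getD (pvToStr c) 0 + 1)) acc) := by
    funext acc w
    rw [List.foldl_map]
  rw [h]

-- filter commutes with (·.map Prod.fst)
theorem pvFilterMapFst (l : List (String × Int)) (p : String → Bool) :
    (l.map Prod.fst).filter p = (l.filter (fun kv => p kv.1)).map Prod.fst := by
  induction l with
  | nil => rfl
  | cons h t ih => by_cases hp : p h.1 <;> simp [hp, ih]

-- first-maximum scan, seeded with the first element
def pvFM : List (String × Int) → String × Int
  | [] => ("", 0)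
  | h :: t => t.foldl (fun p kv => if kv.2 > p.2 then (kv.1, kv.2) else p) h

theorem pvFM_sentinel (h : String × Int) (t : List (String × Int)) (hh : 1 ≤ h.2) :
    (h :: t).foldl (fun p kv => if kv.2 > p.2 then (kv.1, kv.2) else p) ("", 0) = pvFM (h :: t) := by
  have hpos : h.2 > ((("", 0) : String × Int)).2 := by
    show (0 : Int) < h.2
    omega
  simp only [List.foldl_cons, pvFM]
  rw [if_pos hpos]

theorem pvFM_sentinel' (es : List (String × Int)) (hne : es ≠ []) (hv : ∀ kv ∈ es, 1 ≤ kv.2) :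
    es.foldl (fun p kv => if kv.2 > p.2 then (kv.1, kv.2) else p) ("", 0) = pvFM es := by
  cases es with
  | nil => exact absurd rfl hne
  | cons h t => exact pvFM_sentinel h t (hv h (by simp))

theorem pvFM_mem_aux (t : List (String × Int)) : ∀ h : String × Int,
    t.foldl (fun p kv => if kv.2 > p.2 then (kv.1, kv.2) else p) h ∈ h :: t := by
  induction t with
  | nil => intro h; simp
  | cons a t ih =>
    intro h
    simp only [List.foldl_cons]
    have hm := ih (if a.2 > h.2 then (a.1, a.2) else h)
    rcases List.mem_cons.mp hm with hm1 | hm1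
    · rw [hm1]
      by_cases ha : a.2 > h.2
      · rw [if_pos ha]; simp
      · rw [if_neg ha]; simp
    · exact List.mem_cons_of_mem _ (List.mem_cons_of_mem _ hm1)

theorem pvFM_mem (ys : List (String × Int)) (hne : ys ≠ []) : pvFM ys ∈ ys := by
  cases ys with
  | nil => exact absurd rfl hne
  | cons h t => simpa [pvFM] using pvFM_mem_aux t h

theorem pvFM_max_aux (t : List (String × Int)) : ∀ h : String × Int, ∀ y ∈ h :: t,
    y.2 ≤ (t.foldl (fun p kv => if kv.2 > p.2 then (kv.1, kv.2) else p) h).2 := by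
  induction t with
  | nil => intro h y hy; simp at hy; subst hy; rfl
  | cons a t ih =>
    intro h y hy
    simp only [List.foldl_cons]
    have hstep1 : h.2 ≤ (if a.2 > h.2 then (a.1, a.2) else h).2 := by
      by_cases ha : a.2 > h.2 <;> simp [ha] <;> omega
    have hstep2 : a.2 ≤ (if a.2 > h.2 then (a.1, a.2) else h).2 := by
      by_cases ha : a.2 > h.2 <;> simp [ha] <;> omega
    have hhead := ih (if a.2 > h.2 then (a.1, a.2) else h) _ (List.mem_cons_self)
    rcases List.mem_cons.mp hy with hy1 | hy1
    · rw [hy1]; exact le_trans hstep1 hhead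
    · rcases List.mem_cons.mp hy1 with hy2 | hy2
      · rw [hy2]; exact le_trans hstep2 hhead
      · exact ih _ y (List.mem_cons_of_mem _ hy2)

theorem pvFM_max (ys : List (String × Int)) (hne : ys ≠ []) : ∀ y ∈ ys, y.2 ≤ (pvFM ys).2 := by
  cases ys with
  | nil => exact absurd rfl hne
  | cons h t => intro y hy; simpa [pvFM] using pvFM_max_aux t h y hy

theorem pvFM_append (ys : List (String × Int)) (x : String × Int) (hne : ys ≠ []) :
    pvFM (ys ++ [x]) = if x.2 > (pvFM ys).2 then (x.1, x.2) else pvFM ys := by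
  cases ys with
  | nil => exact absurd rfl hne
  | cons h t => simp [pvFM, List.foldl_append]

-- head of the stable sort by descending count = A's first strict maximum
theorem pvSortedHead : ∀ ys : List (String × Int), ys ≠ [] → ys.Nodup →
    PySem.List.sorted ys (fun kv => -kv.2) false
      = pvFM ys :: PySem.List.sorted (ys.erase (pvFM ys)) (fun kv => -kv.2) false := by
  intro ys
  induction ys using List.reverseRecOn with
  | nil => intro h _; exact absurd rfl h
  | append_singleton l x ih =>
    intro _ hnd
    have hxl : x ∉ l := by
      intro hx
      exact (List.nodup_append.mp hnd).2.2 x hx x (List.mem_singleton.mpr rfl) rfl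
    have hndl : l.Nodup := (List.nodup_append.mp hnd).1
    rcases eq_or_ne l [] with hl | hl
    · subst hl
      simp only [List.nil_append]
      have h1 : ([x] : List (String × Int)).erase (pvFM [x]) = [] := by
        simp [pvFM]
      have h2 : pvFM [x] = x := rfl
      rw [h1, h2]
      rfl
    · have hsl : PySem.List.sorted (l ++ [x]) (fun kv : String × Int => -kv.2) false
          = PySem.List.insertBy (fun a b : String × Int => decide ((-a.2) < (-b.2))) x
              (PySem.List.sorted l (fun kv => -kv.2) false) := by
        rw [PySem.List.sorted_eq_foldl_insertBy, PySem.List.sorted_eq_foldl_insertBy, List.foldl_append]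
        simp
      have hfm := pvFM_append l x hl
      by_cases hx : x.2 > (pvFM l).2
      · -- the new element is the strict maximum
        have hx2 : pvFM (l ++ [x]) = (x.1, x.2) := by rw [hfm, if_pos hx]
        have herase : (l ++ [x]).erase (pvFM (l ++ [x])) = l := by
          rw [hx2]
          show (l ++ [x]).erase x = l
          rw [List.erase_append_right _ hxl]
          simp
        rw [hsl, herase, hx2]
        cases hsort : PySem.List.sorted l (fun kv : String × Int => -kv.2) false with
        | nil => exact absurd ((PySem.List.sorted_eq_nil_iff _ _ _).mp hsort) hl
        | cons y r =>
          have hyl : y ∈ l := by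
            have hmem : y ∈ PySem.List.sorted l (fun kv : String × Int => -kv.2) false := by
              rw [hsort]; simp
            exact (PySem.List.mem_sorted _ _ _ _).mp hmem
          have hy : decide ((-x.2 : Int) < (-y.2)) = true := by
            have := pvFM_max l hl y hyl
            simp only [decide_eq_true_eq]
            omega
          show PySem.List.insertBy _ x (y :: r) = (x.1, x.2) :: y :: r
          simp only [PySem.List.insertBy]
          rw [if_pos hy]
      · -- the old first maximum survives
        have hm : pvFM (l ++ [x]) = pvFM l := by rw [hfm, if_neg hx]
        have hml : pvFM l ∈ l := pvFM_mem l hl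
        have herase : (l ++ [x]).erase (pvFM (l ++ [x])) = l.erase (pvFM l) ++ [x] := by
          rw [hm, List.erase_append_left _ hml]
        rw [hsl, herase, hm, ih hl hndl]
        have hbx : decide ((-x.2 : Int) < (-(pvFM l).2)) = false := by
          simp only [decide_eq_false_iff_not]
          omega
        show PySem.List.insertBy _ x (pvFM l :: _) = _
        simp only [PySem.List.insertBy, hbx, Bool.false_eq_true, if_false]
        congr 1
        rw [PySem.List.sorted_eq_foldl_insertBy, PySem.List.sorted_eq_foldl_insertBy, List.foldl_append]
        simp

-- on a list with distinct keys, erasing by key = erasing the pair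
theorem pvFilterKeyErase : ∀ (es : List (String × Int)) (m : String × Int),
    (es.map Prod.fst).Nodup → m ∈ es →
    es.filter (fun p => !(p.1 == m.1)) = es.erase m := by
  intro es
  induction es with
  | nil => intro m _ hm; cases hm
  | cons h t ih =>
    intro m hnd hm
    rw [List.map_cons] at hnd
    have hnd1 : h.1 ∉ t.map Prod.fst := (List.nodup_cons.mp hnd).1
    have hnd2 : (t.map Prod.fst).Nodup := (List.nodup_cons.mp hnd).2
    rcases List.mem_cons.mp hm with hm' | hm'
    · subst hm'
      have hth : t.filter (fun p => !(p.1 == m.1)) = t := by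
        apply List.filter_eq_self.mpr
        intro p hp
        have hpne : p.1 ≠ m.1 := fun he => hnd1 (he ▸ List.mem_map_of_mem hp)
        simp [hpne]
      rw [List.erase_cons_head]
      rw [List.filter_cons_of_neg (by simp)]
      exact hth
    · have hne : h.1 ≠ m.1 := by
        intro he
        exact hnd1 (he ▸ List.mem_map_of_mem hm')
      have hhm : h ≠ m := fun he => hne (by rw [he])
      rw [List.erase_cons_tail (by simp [hhm])]
      have hcons : List.filter (fun p => !(p.1 == m.1)) (h :: t)
          = h :: List.filter (fun p => !(p.1 == m.1)) t := by
        simp [List.filter_cons, hne]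
      rw [hcons, ih m hnd2 hm']

-- A's selection loop, stated on the eligible items list
def pvSelL : Nat → List (String × Int) → List String
  | 0, _ => []
  | n + 1, es =>
    (pvFM es).1 :: pvSelL n (es.erase (pvFM es))

-- the selection loop returns the first n of the stable sort by descending count
theorem pvSelL_eq_sorted : ∀ (n : Nat) (es : List (String × Int)),
    (es.map Prod.fst).Nodup → (∀ kv ∈ es, 1 ≤ kv.2) → n ≤ es.length →
    pvSelL n es = ((PySem.List.sorted es (fun kv => -kv.2) false).take n).map Prod.fst := by
  intro n
  induction n with
  | zero => intro es _ _ _; simp [pvSelL]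
  | succ n ih =>
    intro es hnd hv hn
    have hne : es ≠ [] := by intro he; subst he; simp at hn
    have hndp : es.Nodup := List.Nodup.of_map _ hnd
    rw [pvSortedHead es hne hndp]
    have hm : pvFM es ∈ es := pvFM_mem es hne
    have hlen : (es.erase (pvFM es)).length = es.length - 1 := List.length_erase_of_mem hm
    have hsub : (es.erase (pvFM es)).Sublist es := List.erase_sublist
    have hih := ih (es.erase (pvFM es))
      ((hnd.sublist (hsub.map Prod.fst)))
      (fun kv hkv => hv kv (hsub.mem hkv))
      (by omega)
    simp only [pvSelL, List.take_succ_cons, List.map_cons]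
    rw [hih]

-- the omit-skipping scan over all items is the plain scan over the eligible items
theorem pvLargest_eq_fold (omit_ : List String) (d : PySem.Dict String Int) :
    pvLargest omit_ d
      = (d.items.filter (fun kv => !(omit_.contains kv.1))).foldl
          (fun p kv => if kv.2 > p.2 then (kv.1, kv.2) else p) ("", 0) := by
  unfold pvLargest
  rw [List.foldl_filter]
  have h : (fun (p : String × Int) (kv : String × Int) =>
        if omit_.contains kv.1 then p
        else if kv.2 > p.2 then (kv.1, kv.2) else p)
      = (fun (p : String × Int) (kv : String × Int) =>
        if (!(omit_.contains kv.1)) = true then (if kv.2 > p.2 then (kv.1, kv.2) else p) else p) := by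
    funext p kv
    by_cases hc : omit_.contains kv.1 <;> simp [hc]
  rw [h]

-- iterating A's step collects pvSelL of the eligible items
theorem pvIterA (omit_ : List String) : ∀ (n : Nat) (letters : List String) (d : PySem.Dict String Int),
    d.keys.Nodup → (∀ kv ∈ d.items, 1 ≤ kv.2) →
    n ≤ (d.items.filter (fun kv => !(omit_.contains kv.1))).length →
    ((pvStepA omit_)^[n] (letters, d)).1
      = letters ++ pvSelL n (d.items.filter (fun kv => !(omit_.contains kv.1))) := by
  intro n
  induction n with
  | zero => intro letters d _ _ _; simp [pvSelL]
  | succ n ih =>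
    intro letters d hnd hv hn
    set es := d.items.filter (fun kv => !(omit_.contains kv.1)) with hes
    have hne : es ≠ [] := by intro he; rw [he] at hn; simp at hn
    have hesnd : (es.map Prod.fst).Nodup := by
      rw [hes]
      have h1 : (List.filter (fun kv => !(omit_.contains kv.1)) d.items).map Prod.fst
          = (d.items.map Prod.fst).filter (fun k => !(omit_.contains k)) :=
        (pvFilterMapFst d.items (fun k => !(omit_.contains k))).symm
      rw [h1]
      exact hnd.filter _
    have hesv : ∀ kv ∈ es, 1 ≤ kv.2 := fun kv hkv => hv kv (List.mem_of_mem_filter hkv)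
    -- the inner scan computes pvFM es
    have hlarge : pvLargest omit_ d = pvFM es := by
      rw [pvLargest_eq_fold, ← hes]
      exact pvFM_sentinel' es hne hesv
    have hmem : pvFM es ∈ es := pvFM_mem es hne
    -- the erased dict's eligible items
    have herase : (d.erase (pvFM es).1).items.filter (fun kv => !(omit_.contains kv.1))
        = es.erase (pvFM es) := by
      show (d.items.filter (fun p => !(p.1 == (pvFM es).1))).filter (fun kv => !(omit_.contains kv.1))
          = es.erase (pvFM es)
      rw [List.filter_comm, ← hes]
      exact pvFilterKeyErase es (pvFM es) hesnd hmem
    have hstep : pvStepA omit_ (letters, d)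
        = (letters ++ [(pvFM es).1], d.erase (pvFM es).1) := by
      simp [pvStepA, hlarge]
    have hnd' : (d.erase (pvFM es).1).keys.Nodup := by
      show ((d.items.filter (fun p => !(p.1 == (pvFM es).1))).map Prod.fst).Nodup
      have h1 : (d.items.filter (fun p => !(p.1 == (pvFM es).1))).map Prod.fst
          = (d.items.map Prod.fst).filter (fun k => !(k == (pvFM es).1)) :=
        (pvFilterMapFst d.items (fun k => !(k == (pvFM es).1))).symm
      rw [h1]
      exact hnd.filter _
    have hv' : ∀ kv ∈ (d.erase (pvFM es).1).items, 1 ≤ kv.2 := by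
      intro kv hkv
      exact hv kv (List.mem_of_mem_filter hkv)
    have hlen : (es.erase (pvFM es)).length = es.length - 1 := List.length_erase_of_mem hmem
    rw [Function.iterate_succ_apply, hstep, ih _ _ hnd' hv' (by rw [herase]; omega), herase]
    simp [pvSelL, List.append_assoc]

-- stable sort commutes with projecting distinct-keyed pairs to their keys
theorem pvInsertBy_map (g : String → Int) (x : String × Int) (hx : g x.1 = -x.2) :
    ∀ ys : List (String × Int), (∀ y ∈ ys, g y.1 = -y.2) →
    PySem.List.insertBy (fun a b => decide (g a < g b)) x.1 (ys.map Prod.fst)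
      = (PySem.List.insertBy (fun a b : String × Int => decide ((-a.2) < (-b.2))) x ys).map Prod.fst := by
  intro ys
  induction ys with
  | nil => intro _; rfl
  | cons y t ih =>
    intro hY
    have hy : g y.1 = -y.2 := hY y (by simp)
    show PySem.List.insertBy _ x.1 (y.1 :: t.map Prod.fst) = _
    by_cases hlt : (-x.2 : Int) < -y.2
    · have h1 : decide (g x.1 < g y.1) = true := by
        rw [hx, hy]; simp only [decide_eq_true_eq]; exact hlt
      have h2 : decide ((-x.2 : Int) < -y.2) = true := by
        simp only [decide_eq_true_eq]; exact hlt
      simp only [PySem.List.insertBy]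
      rw [if_pos h1, if_pos h2]
      simp
    · have h1 : decide (g x.1 < g y.1) = false := by
        rw [hx, hy]; simp only [decide_eq_false_iff_not]; exact hlt
      have h2 : decide ((-x.2 : Int) < -y.2) = false := by
        simp only [decide_eq_false_iff_not]; exact hlt
      have h1' : ¬ (decide (g x.1 < g y.1) = true) := by
        rw [h1]; exact Bool.false_ne_true
      have h2' : ¬ (decide ((-x.2 : Int) < -y.2) = true) := by
        rw [h2]; exact Bool.false_ne_true
      simp only [PySem.List.insertBy]
      rw [if_neg h1', if_neg h2']
      simp only [List.map_cons]
      rw [ih (fun z hz => hY z (List.mem_cons_of_mem _ hz))]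

theorem pvSorted_map (g : String → Int) : ∀ es : List (String × Int), (∀ kv ∈ es, g kv.1 = -kv.2) →
    PySem.List.sorted (es.map Prod.fst) g false
      = (PySem.List.sorted es (fun kv => -kv.2) false).map Prod.fst := by
  intro es
  induction es using List.reverseRecOn with
  | nil => intro _; rfl
  | append_singleton l x ih =>
    intro hE
    have hx : g x.1 = -x.2 := hE x (by simp)
    have hl : ∀ kv ∈ l, g kv.1 = -kv.2 := fun kv hkv => hE kv (by simp [hkv])
    rw [List.map_append, List.map_singleton,
      PySem.List.sorted_eq_foldl_insertBy, List.foldl_append,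
      PySem.List.sorted_eq_foldl_insertBy (l ++ [x]), List.foldl_append]
    simp only [List.foldl_cons, List.foldl_nil]
    rw [← PySem.List.sorted_eq_foldl_insertBy, ← PySem.List.sorted_eq_foldl_insertBy, ih hl]
    exact pvInsertBy_map g x hx _
      (fun y hy => hl y ((PySem.List.mem_sorted _ _ _ _).mp hy))

theorem suggest_letters_spec : Claim_equal_suggest_letters := by
  intro words omit_ include_ _ hpre
  unfold Pre_suggest_letters at hpre
  unfold Spec_suggest_letters suggest_letters suggest_letters_alt
  set L := words.flatMap (fun w => w.toList.map pvToStr) with hL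
  have hdB : pvDistB words = PySem.Dict.counter L := pvDistB_eq_counter words
  have hdA : pvDistA words = PySem.Dict.counter L := by rw [pvDistA_eq_pvDistB, hdB]
  set d := PySem.Dict.counter L with hd
  have hkeys : d.keys = PySem.Set.ofList L := PySem.Dict.keys_counter L
  have hknd : d.keys.Nodup := PySem.Dict.nodup_keys_counter L
  set es := d.items.filter (fun kv => !(omit_.contains kv.1)) with hes
  have hkeysfst : d.keys.filter (fun k => !(omit_.contains k)) = es.map Prod.fst := by
    rw [hes]
    exact pvFilterMapFst d.items (fun k => !(omit_.contains k))
  have hesnd : (es.map Prod.fst).Nodup := by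
    rw [← hkeysfst]
    exact hknd.filter _
  have hvals : ∀ kv ∈ d.items, 1 ≤ kv.2 := by
    intro kv hkvi
    rw [hd, PySem.Dict.items_counter] at hkvi
    rcases List.mem_map.mp hkvi with ⟨k, hk, hkv'⟩
    have hkL : k ∈ L := (PySem.Set.mem_ofList L k).mp hk
    have hc : 0 < L.count k := List.count_pos_iff.mpr hkL
    rw [← hkv']
    show (1 : Int) ≤ ((L.count k : Nat) : Int)
    exact_mod_cast hc
  have hesv : ∀ kv ∈ es, 1 ≤ kv.2 := fun kv hkv => hvals kv (List.mem_of_mem_filter hkv)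
  have hgkey : ∀ kv ∈ es, -(d.getD kv.1 0) = -kv.2 := by
    intro kv hkv
    have hkvi : kv ∈ d.items := List.mem_of_mem_filter hkv
    rw [hd, PySem.Dict.items_counter] at hkvi
    rcases List.mem_map.mp hkvi with ⟨k, _, hkv'⟩
    rw [← hkv']
    show -(d.getD k 0) = -((L.count k : Int))
    rw [hd, PySem.Dict.getD_counter]
  have heslen : es.length = (pvEligibleOf words omit_).length := by
    have h1 : es.map Prod.fst = pvEligibleOf words omit_ := by
      rw [← hkeysfst, hkeys]
      rfl
    rw [← h1, List.length_map]
  have hinc : (PySem.Dict.ofList include_).keys = PySem.List.dedup (include_.map Prod.fst) := by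
    show (List.foldl (fun acc p => acc.insert p.1 p.2) PySem.Dict.empty include_).keys = _
    rw [PySem.Dict.keys_foldl_insert_key include_ Prod.fst (fun _ p => p.2) PySem.Dict.empty,
      PySem.List.dedup_eq_ofList]
    rfl
  set inc := (PySem.Dict.ofList include_).keys with hi
  set need : Int := 5 - (inc.length : Int) with hneed
  have hnlen : need ≤ (es.length : Int) := by
    rw [heslen, hneed, hinc]
    exact hpre
  set n : Nat := need.toNat with hn
  have hfoldconst : ∀ (r : List Int) (st : List String × PySem.Dict String Int),
      r.foldl (fun st _ => pvStepA omit_ st) st = (pvStepA omit_)^[r.length] st := by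
    intro r
    induction r with
    | nil => intro st; rfl
    | cons a t ihr =>
      intro st
      rw [List.foldl_cons, List.length_cons, Function.iterate_succ_apply]
      exact ihr _
  have hrange : (PySem.List.pyRange ((inc.length : Int)) 5 1).length = n := by
    rw [PySem.List.length_pyRange_one]
  rw [hfoldconst, hrange, hdA, hdB]
  have hA := pvIterA omit_ n inc d hknd hvals (by rw [← hes]; omega)
  rw [← hes] at hA
  rw [hA]
  refine congrArg (PySem.Str.join "") (congrArg (inc ++ ·) ?_)
  by_cases hpos : 0 < need
  · rw [if_pos hpos, hkeysfst, pvSorted_map (fun k => -(d.getD k 0)) es hgkey]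
    rw [pvSelL_eq_sorted n es hesnd hesv (by omega)]
    rw [List.map_take]
  · rw [if_neg hpos]
    have hzero : n = 0 := by omega
    rw [hzero]
    rfl

@[simp] theorem suggest_letters_raises : Claim_raises_suggest_letters := by
  unfold Claim_raises_suggest_letters
  constructor
  · intro words omit_ include_ _ hr hp
    unfold Raises_suggest_letters at hr
    unfold Pre_suggest_letters at hp
    omega
  · exact ⟨by decide, by decide, by decide⟩
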